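-- pv_equiv track=rewrite | github.com/subZiro/poem_telegram_bot_python | read_txt.py | f_correct_book
-- ===== SOURCE A (Python) =====
-- def f_correct_book(array:list):
-- 	# приведение считанных данных к формату
-- 	# ['name_book', 'author', 'title_stih', 'stih', 'date_stih', 'title_stih', 'stih', 'date_stih',...]
-- 	result = []
-- 	sum_s = ''
-- 	array[0],array[1] = array[1], array[0]
-- 	#result.append(array[0])
--
-- 	for i in range(len(array)):
-- 		line = array[i]
-- 		line_d = len([x for x in line if x.isdigit()])
-- 		if line.isupper() or line == '* * *' or line_d >= 4:
-- 			if sum_s: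
-- 				result.append(sum_s[:-1])
-- 				sum_s = ''
-- 			result.append(line)
-- 		else:
-- 			sum_s += line + '\n'
--
-- 	if sum_s:
-- 		result.append(sum_s)
--
-- 	return result
-- ===== SOURCE B (Python) =====
-- def f_correct_book(array: list):
--     # Reformat book lines: header lines (all-caps titles, the '* * *' divider,
--     # or date lines with at least 4 digits) go into the result on their own;
--     # the lines between headers form one newline-terminated text block, and the
--     # newline sitting just before a following header is dropped.
--     array[0], array[1] = array[1], array[0]
--     result = []
--     i, n = 0, len(array)
--     while i < n:
--         j = i
--         while j < n and not _is_header(array[j]):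
--             j += 1
--         if j > i:
--             text = ''.join(line + '\n' for line in array[i:j])
--             if j < n:
--                 text = text[:-1]
--             result.append(text)
--         if j < n:
--             result.append(array[j])
--         i = j + 1
--     return result
--
--
-- def _is_header(line):
--     return line.isupper() or line == '* * *' or sum(c.isdigit() for c in line) >= 4
-- ===== Notes on version B (the rewrite author's own statement) =====
-- stated objective: alternative
-- what changed: A walks line by line with a running string accumulator (repeated += and a [:-1] strip at each flush); B splits the swapped list into maximal non-header runs with an index scan, builds each block's newline-terminated text with one join over the slice, and drops the newline before a following header. Pre_ excludes lists with fewer than two elements, on which both A and B raise IndexError at the initial swap.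
import Mathlib
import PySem

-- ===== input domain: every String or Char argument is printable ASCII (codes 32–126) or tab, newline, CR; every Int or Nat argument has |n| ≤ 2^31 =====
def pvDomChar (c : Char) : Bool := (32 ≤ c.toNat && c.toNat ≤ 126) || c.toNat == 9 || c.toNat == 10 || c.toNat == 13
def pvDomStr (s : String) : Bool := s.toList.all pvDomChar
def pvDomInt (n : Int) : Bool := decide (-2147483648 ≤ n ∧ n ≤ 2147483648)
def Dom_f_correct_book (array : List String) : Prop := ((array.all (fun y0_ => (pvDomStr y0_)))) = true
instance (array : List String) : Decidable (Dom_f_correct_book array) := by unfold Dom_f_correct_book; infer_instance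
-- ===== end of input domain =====

-- B replaces A's running string accumulator by a run-splitting scan (each maximal
-- non-header run becomes one newline-terminated block built by a single join, and the
-- newline before a following header is dropped); equivalence is about the RETURN value —
-- both A and B perform the same in-place swap of array[0] and array[1] on the Python side.

-- ===== PORT A =====
-- str.isupper() ported by hand (exact on the ASCII domain, where the cased characters
-- are exactly the letters a-z/A-Z): some uppercase letter and no lowercase letter.
def pyIsupperStrA (s : String) : Bool :=
  (s.toList.any PySem.Chars.isupper) && !(s.toList.any PySem.Chars.islower)

-- A's separator test: line.isupper() or line == '* * *' or len([x for x in line if x.isdigit()]) >= 4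
def sepA (line : String) : Bool :=
  pyIsupperStrA line || line == "* * *" ||
    decide (4 ≤ (line.toList.filter PySem.Chars.isdigit).length)

-- A's for-loop over the swapped array, state = (result, sum_s); after the loop the
-- final 'if sum_s: result.append(sum_s)'.
def loopA : List String → List String → String → List String
  | [], res, s => if s ≠ "" then res ++ [s] else res
  | l :: ls, res, s =>
    if sepA l then
      (if s ≠ "" then
        loopA ls (res ++ [PySem.Str.slice s none (some (-1))] ++ [l]) ""
      else
        loopA ls (res ++ [l]) "")
    else
      loopA ls res (s ++ l ++ "\n")

def f_correct_book (array : List String) : List String :=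
  match array with
  | a :: b :: rest => loopA (b :: a :: rest) [] ""   -- array[0],array[1] = array[1],array[0]
  | _ => []   -- len(array) < 2: Python raises IndexError; excluded by Pre_

-- ===== PORT B =====
-- str.isupper() ported by hand for B as well (exact on the ASCII domain, where the
-- cased characters are exactly the letters a-z/A-Z).
def pyIsupperStrB (s : String) : Bool :=
  (s.toList.any PySem.Chars.isupper) && !(s.toList.any PySem.Chars.islower)

-- B's header test: line.isupper() or line == '* * *' or sum(c.isdigit() for c in line) >= 4
def sepB (line : String) : Bool :=
  pyIsupperStrB line || line == "* * *" ||
    decide (4 ≤ line.toList.countP PySem.Chars.isdigit)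

-- ''.join(line + '\n' for line in run)
def joinTermB (run : List String) : String :=
  PySem.Str.join "" (run.map (fun l => l ++ "\n"))

-- B's outer while loop over the remaining suffix array[i:], state = result; the inner
-- while loop scanning j is takeWhile/dropWhile of the suffix; the run's block text is
-- built by one join and loses its final newline when a header follows (text[:-1]).
def loopB (arr res : List String) : List String :=
  match hrest : arr.dropWhile (fun x => !sepB x) with
  | [] =>
      if (arr.takeWhile (fun x => !sepB x)).isEmpty then res
      else res ++ [joinTermB (arr.takeWhile (fun x => !sepB x))]
  | s :: rest =>
      loopB rest
        ((if (arr.takeWhile (fun x => !sepB x)).isEmpty then res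
          else res ++ [PySem.Str.slice (joinTermB (arr.takeWhile (fun x => !sepB x))) none (some (-1))]) ++ [s])
termination_by arr.length
decreasing_by
  have h := List.length_dropWhile_le (fun x => !sepB x) arr
  rw [hrest] at h
  simp at h
  omega

def f_correct_book_alt (array : List String) : List String :=
  match array with
  | [] => []          -- len(array) < 2: B's swap raises IndexError too; excluded by Pre_
  | [_] => []
  | a :: b :: rest => loopB (b :: a :: rest) []   -- the same in-place swap

-- ===== PRECONDITION & SPEC =====
-- Both A and B raise IndexError (at the swap) when the list has fewer than two elements.
def Pre_f_correct_book (array : List String) : Prop := 2 ≤ array.length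
instance (array : List String) : Decidable (Pre_f_correct_book array) := by
  unfold Pre_f_correct_book; infer_instance

def pvWitness_f_correct_book : List String :=
  ["The Book", "AUTHOR", "* * *", "first line", "second line", "1990 1991"]

def Spec_f_correct_book (array : List String) (out : List String) : Prop := out = f_correct_book_alt array
instance (array : List String) (out : List String) : Decidable (Spec_f_correct_book array out) := by unfold Spec_f_correct_book; infer_instance

-- ===== CLAIM (what is proved, stated in full; the proofs are below) =====
def Claim_equal_f_correct_book : Prop := ∀ (array : List String), Dom_f_correct_book array → Pre_f_correct_book array → Spec_f_correct_book array (f_correct_book array)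

-- ===== LEMMAS AND PROOFS =====

theorem sepA_eq (l : String) : sepA l = sepB l := by
  simp [sepA, sepB, pyIsupperStrA, pyIsupperStrB, List.countP_eq_length_filter]

-- proof helper: the block decomposition both loops compute, written as a plain recursion
def blocksB : List String → List String
  | [] => []
  | l :: ls =>
    if sepB l then l :: blocksB ls
    else
      let run := ls.takeWhile (fun x => !sepB x)
      let rest := ls.dropWhile (fun x => !sepB x)
      let text := PySem.Str.join "\n" (l :: run)
      if rest.isEmpty then [text ++ "\n"] else text :: blocksB rest
termination_by lines => lines.length
decreasing_by
  · simp
  · simp only [List.length_cons]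
    have := List.length_dropWhile_le (fun x => !sepB x) ls
    omega

-- the value of A's sum_s after absorbing the non-separator run `run`
def pend (run : List String) : String :=
  if run = [] then "" else PySem.Str.join "\n" run ++ "\n"

theorem chars_join_append (sep y : List Char) (xs : List (List Char)) (h : xs ≠ []) :
    PySem.Chars.join sep (xs ++ [y]) = PySem.Chars.join sep xs ++ sep ++ y := by
  induction xs with
  | nil => simp at h
  | cons x t ih =>
    cases t with
    | nil => simp [PySem.Chars.join_cons_cons, PySem.Chars.join_singleton]
    | cons x2 t2 =>
      have hih := ih (by simp)
      simp only [List.cons_append] at hih ⊢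
      rw [PySem.Chars.join_cons_cons, hih, PySem.Chars.join_cons_cons]
      simp [List.append_assoc]

theorem join_append (y : String) (xs : List String) (h : xs ≠ []) :
    PySem.Str.join "\n" (xs ++ [y]) = PySem.Str.join "\n" xs ++ "\n" ++ y := by
  apply String.toList_inj.mp
  simp only [PySem.Str.toList_join, String.toList_append, List.map_append, List.map]
  exact chars_join_append _ _ _ (by simpa using h)

theorem pend_append (run : List String) (l : String) :
    pend (run ++ [l]) = pend run ++ l ++ "\n" := by
  cases run with
  | nil =>
    apply String.toList_inj.mp
    simp [pend, PySem.Str.toList_join, PySem.Chars.join_singleton]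
  | cons r t =>
    rw [pend, pend, if_neg (by simp), if_neg (by simp), join_append l (r :: t) (by simp)]

theorem pend_ne_empty (run : List String) (h : run ≠ []) : pend run ≠ "" := by
  rw [pend, if_neg h]
  intro hc
  have := congrArg String.toList hc
  simp [String.toList_append] at this

theorem strip_pend (run : List String) (h : run ≠ []) :
    PySem.Str.slice (pend run) none (some (-1)) = PySem.Str.join "\n" run := by
  rw [pend, if_neg h]
  apply String.toList_inj.mp
  simp [pysem, String.toList_append]

-- B's one-join block text is A's accumulator value
theorem joinTermB_eq_pend (run : List String) : joinTermB run = pend run := by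
  induction run with
  | nil =>
    apply String.toList_inj.mp
    simp [joinTermB, pend, PySem.Str.toList_join, PySem.Chars.join_nil]
  | cons r t ih =>
    cases t with
    | nil =>
      apply String.toList_inj.mp
      simp [joinTermB, pend, PySem.Str.toList_join, PySem.Chars.join_singleton,
        String.toList_append]
    | cons r2 t2 =>
      apply String.toList_inj.mp
      have hih := congrArg String.toList ih
      simp only [joinTermB, pend, if_neg (by simp : (r2 :: t2 : List String) ≠ [])] at hih
      simp only [joinTermB, pend, if_neg (by simp : (r :: r2 :: t2 : List String) ≠ []),
        PySem.Str.toList_join, List.map_cons, String.toList_append] at hih ⊢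
      rw [PySem.Chars.join_cons_cons, PySem.Chars.join_cons_cons, hih]
      simp [List.append_assoc]

theorem loopA_res (ls : List String) (res1 res2 : List String) (s : String) :
    loopA ls (res1 ++ res2) s = res1 ++ loopA ls res2 s := by
  induction ls generalizing res2 s with
  | nil => by_cases h : s = "" <;> simp [loopA, h]
  | cons l t ih =>
    by_cases hs : sepA l
    · by_cases h : s = "" <;>
        · simp only [loopA, hs, h, ne_eq, not_true_eq_false, not_false_eq_true, if_true,
            if_false, List.append_assoc]
          exact ih _ _
    · simp only [loopA, hs, ite_false, Bool.false_eq_true]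
      exact ih _ _

theorem dropWhile_head_false {α : Type} (p : α → Bool) (l : List α) (s : α) (rest : List α)
    (h : l.dropWhile p = s :: rest) : p s = false := by
  induction l with
  | nil => simp [List.dropWhile] at h
  | cons a t ih =>
    by_cases hp : p a
    · rw [List.dropWhile_cons_of_pos hp] at h
      exact ih h
    · rw [List.dropWhile_cons_of_neg hp] at h
      cases h
      simpa using hp

theorem loopB_res (ls : List String) (res1 res2 : List String) :
    loopB ls (res1 ++ res2) = res1 ++ loopB ls res2 := by
  rw [loopB, loopB]
  cases hrest : ls.dropWhile (fun x => !sepB x) with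
  | nil =>
    by_cases he : (ls.takeWhile (fun x => !sepB x)).isEmpty <;> simp [he]
  | cons s rest =>
    by_cases he : (ls.takeWhile (fun x => !sepB x)).isEmpty
    · simp only [he, if_true, List.append_assoc]
      exact loopB_res rest res1 (res2 ++ [s])
    · simp only [he, if_false, Bool.false_eq_true, List.append_assoc]
      exact loopB_res rest res1 _
termination_by ls.length
decreasing_by all_goals
  (have h := List.length_dropWhile_le (fun x => !sepB x) ls;
   rw [hrest] at h; simp at h; omega)

-- B's run-splitting loop computes the block decomposition
theorem loopB_blocksB (ls : List String) : loopB ls [] = blocksB ls := by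
  cases ls with
  | nil =>
    rw [loopB]
    split
    · simp [blocksB]
    · next s rest hEq => simp at hEq
  | cons l t =>
    by_cases hsep : sepB l
    · have hdrop : (l :: t).dropWhile (fun x => !sepB x) = l :: t :=
        List.dropWhile_cons_of_neg (by simp [hsep])
      have htake : ((l :: t).takeWhile (fun x => !sepB x)) = [] :=
        List.takeWhile_cons_of_neg (by simp [hsep])
      rw [loopB]
      split
      · next hEq => rw [hdrop] at hEq; simp at hEq
      · next s rest hEq =>
        rw [hdrop] at hEq
        injection hEq with h1 h2
        subst h1; subst h2
        simp only [htake, List.isEmpty_nil, if_true, List.nil_append]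
        rw [show ([l] : List String) = [l] ++ [] by simp, loopB_res, loopB_blocksB t,
          blocksB, if_pos hsep]
        simp
    · have hdrop : (l :: t).dropWhile (fun x => !sepB x) = t.dropWhile (fun x => !sepB x) :=
        List.dropWhile_cons_of_pos (by simp [hsep])
      have htake : ((l :: t).takeWhile (fun x => !sepB x))
          = l :: t.takeWhile (fun x => !sepB x) :=
        List.takeWhile_cons_of_pos (by simp [hsep])
      rw [loopB]
      split
      · next hEq =>
        rw [hdrop] at hEq
        simp only [htake, List.isEmpty_cons, Bool.false_eq_true, if_false, List.nil_append]
        rw [blocksB, if_neg hsep]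
        simp only [hEq, List.isEmpty_nil, if_true]
        rw [joinTermB_eq_pend, pend, if_neg (by simp)]
      · next s rest hEq =>
        rw [hdrop] at hEq
        have hs : sepB s := by
          have := dropWhile_head_false (fun x => !sepB x) t s rest hEq
          simpa using this
        simp only [htake, List.isEmpty_cons, Bool.false_eq_true, if_false, List.nil_append]
        rw [joinTermB_eq_pend, strip_pend _ (by simp),
          show ([PySem.Str.join "\n" (l :: t.takeWhile (fun x => !sepB x))] ++ [s] : List String)
            = ([PySem.Str.join "\n" (l :: t.takeWhile (fun x => !sepB x))] ++ [s]) ++ [] by simp,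
          loopB_res, loopB_blocksB rest]
        rw [blocksB, if_neg hsep]
        simp only [hEq, List.isEmpty_cons, Bool.false_eq_true, if_false]
        rw [blocksB, if_pos hs]
        simp
termination_by ls.length
decreasing_by
  · simp
  · simp only [List.length_cons]
    have h := List.length_dropWhile_le (fun x => !sepB x) t
    rename_i hEq2 _
    rw [hdrop] at hEq2
    rw [hEq2] at h
    simp at h
    omega

-- the combined invariant for A: P = empty accumulator, Q = accumulator holding run `run`
theorem loopA_blocksB (ls : List String) :
    (loopA ls [] "" = blocksB ls) ∧
    (∀ run : List String, run ≠ [] →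
      loopA ls [] (pend run) =
        (if (ls.dropWhile (fun x => !sepB x)).isEmpty then
          [PySem.Str.join "\n" (run ++ ls.takeWhile (fun x => !sepB x)) ++ "\n"]
        else
          PySem.Str.join "\n" (run ++ ls.takeWhile (fun x => !sepB x)) ::
            blocksB (ls.dropWhile (fun x => !sepB x)))) := by
  induction ls with
  | nil =>
    constructor
    · simp [loopA, blocksB]
    · intro run hrun
      rw [loopA, if_pos (by simpa using pend_ne_empty run hrun)]
      rw [pend, if_neg hrun]
      simp
  | cons l t ih =>
    obtain ⟨ihP, ihQ⟩ := ih
    by_cases hsep : sepB l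
    · constructor
      · rw [loopA, sepA_eq, if_pos hsep, if_neg (by simp)]
        rw [show ([] ++ [l] : List String) = [l] ++ [] by simp, loopA_res, ihP,
          blocksB, if_pos hsep]
        simp
      · intro run hrun
        rw [loopA, sepA_eq, if_pos hsep, if_pos (by simpa using pend_ne_empty run hrun)]
        rw [show ([] ++ [PySem.Str.slice (pend run) none (some (-1))] ++ [l] : List String)
              = [PySem.Str.slice (pend run) none (some (-1)), l] ++ [] by simp,
          loopA_res, ihP]
        simp only [List.dropWhile, List.takeWhile, hsep, Bool.not_true, List.isEmpty_cons,
          Bool.false_eq_true, if_false, List.append_nil]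
        rw [strip_pend run hrun, blocksB, if_pos hsep]
        simp
    · constructor
      · rw [loopA, sepA_eq, if_neg (by simp [hsep])]
        have hl : ("" : String) ++ l ++ "\n" = pend [l] := by
          apply String.toList_inj.mp
          simp [pend, PySem.Str.toList_join, PySem.Chars.join_singleton, String.toList_append]
        rw [hl, ihQ [l] (by simp)]
        rw [blocksB, if_neg hsep]
        simp
      · intro run hrun
        rw [loopA, sepA_eq, if_neg (by simp [hsep])]
        rw [show pend run ++ l ++ "\n" = pend (run ++ [l]) from (pend_append run l).symm]
        rw [ihQ (run ++ [l]) (by simp)]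
        simp [List.takeWhile, List.dropWhile, hsep]

-- ===== VERDICT (by name: the statement is the Claim_ definition above) =====
theorem f_correct_book_spec : Claim_equal_f_correct_book := by
  intro array _ hpre
  unfold Spec_f_correct_book
  match array with
  | a :: b :: rest =>
    show loopA (b :: a :: rest) [] "" = loopB (b :: a :: rest) []
    rw [loopB_blocksB]
    exact (loopA_blocksB (b :: a :: rest)).1
  | [] => exact absurd hpre (by simp [Pre_f_correct_book])
  | [x] => exact absurd hpre (by simp [Pre_f_correct_book])
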